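-- pv_equiv track=rewrite | github.com/KoustubhPK/studyboard | python-basics/exercises/2025-08-26_package-practice/packages/string_utils.py | most_occurred_char
-- ===== SOURCE A (Python) =====
-- def most_occurred_char(s: str):
--     """
--     Returns the most occurred character and its frequency in a string.
--     """
--     if not s:
--         return None, 0
--
--     freq = {}
--     for char in s:
--         if char != " ":
--             freq[char] = freq.get(char, 0) + 1
--     most_char = max(freq, key=freq.get)
--     return most_char, freq[most_char]
-- ===== SOURCE B (Python) =====
-- def most_occurred_char(s: str):
--     """
--     Returns the most occurred character and its frequency in a string.
--     """
--     if not s: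
--         return None, 0
--
--     def best_of(u):
--         # strip every copy of the first character, count it by the length drop,
--         # and compare with the best of what remains (the earlier char wins ties)
--         if not u:
--             return None, 0
--         c = u[0]
--         rest = [x for x in u if x != c]
--         cnt = len(u) - len(rest)
--         bc, bn = best_of(rest)
--         return (c, cnt) if cnt >= bn else (bc, bn)
--
--     return best_of([c for c in s if c != " "])
-- ===== Notes on version B (the rewrite author's own statement) =====
-- stated objective: alternative
-- what changed: B replaces A's build-a-frequency-dict-then-argmax with a recursive successive-extraction scheme: strip every copy of the first character with a filter, obtain its count from the length drop, recurse on the remainder; the earlier character wins ties, so no dict, no max and no count table is kept.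
import Mathlib
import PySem

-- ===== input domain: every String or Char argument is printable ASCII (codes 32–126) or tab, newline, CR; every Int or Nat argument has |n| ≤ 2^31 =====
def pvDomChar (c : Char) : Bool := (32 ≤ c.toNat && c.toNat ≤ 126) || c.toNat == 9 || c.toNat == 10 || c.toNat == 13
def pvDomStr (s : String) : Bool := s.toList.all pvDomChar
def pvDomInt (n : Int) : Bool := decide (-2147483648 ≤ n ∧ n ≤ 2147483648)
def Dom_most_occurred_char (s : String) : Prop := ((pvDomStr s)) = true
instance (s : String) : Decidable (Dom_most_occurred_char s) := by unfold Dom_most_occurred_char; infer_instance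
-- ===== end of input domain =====

-- B replaces A's frequency-dict-then-argmax with a recursive successive-extraction scheme
-- (strip all copies of the first character, count it by the length drop, recurse on the rest);
-- objective: alternative. Where A raises ValueError (non-empty all-space input) B returns (None, 0).


-- ===== PORT A =====
def most_occurred_char (s : String) : Option String × Int :=
  if s.toList = [] then (none, 0)
  else
    let freq : PySem.Dict Char Int :=
      s.toList.foldl (fun d char => if char ≠ ' ' then d.insert char (d.getD char 0 + 1) else d)
        PySem.Dict.empty
    match PySem.List.max? freq.keys (fun k => freq.getD k 0) with
    | none => (none, 0)   -- Python raises ValueError here (max of empty dict); outside Pre_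
    | some most_char => (some (String.ofList [most_char]), freq.getD most_char 0)

-- ===== PORT B =====
-- helper best_of of Source B: strip every copy of the first character, count it by the
-- length drop, recurse on the remainder; earlier character wins ties
def bestOf : List Char → Option Char × Int
  | [] => (none, 0)
  | c :: v =>
    let rest := (c :: v).filter (fun x => x ≠ c)
    let cnt : Int := ((c :: v).length : Int) - (rest.length : Int)
    let bp := bestOf rest
    if cnt ≥ bp.2 then (some c, cnt) else bp
termination_by u => u.length
decreasing_by
  have h1 : (c :: v).filter (fun x => x ≠ c) = v.filter (fun x => x ≠ c) :=
    List.filter_cons_of_neg (by simp)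
  have h2 := List.length_filter_le (fun x => decide (x ≠ c)) v
  simp only [h1, List.length_cons]
  omega

def most_occurred_char_alt (s : String) : Option String × Int :=
  if s.toList = [] then (none, 0)
  else
    let p := bestOf (s.toList.filter (fun c => c ≠ ' '))
    (p.1.map (fun c => String.ofList [c]), p.2)

-- ===== PRECONDITION & SPEC =====
-- Pre_ excludes exactly the non-empty all-space strings, on which Python A raises
-- ValueError (max over an empty dict).
def Pre_most_occurred_char (s : String) : Prop :=
  s.toList = [] ∨ s.toList.any (fun c => c ≠ ' ') = true
instance (s : String) : Decidable (Pre_most_occurred_char s) := by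
  unfold Pre_most_occurred_char; infer_instance
def pvWitness_most_occurred_char : String := "hello world"

def Spec_most_occurred_char (s : String) (out : Option String × Int) : Prop := out = most_occurred_char_alt s
instance (s : String) (out : Option String × Int) : Decidable (Spec_most_occurred_char s out) := by unfold Spec_most_occurred_char; infer_instance

-- ===== CLAIM (what is proved, stated in full; the proofs are below) =====
def Claim_equal_most_occurred_char : Prop := ∀ (s : String), Dom_most_occurred_char s → Pre_most_occurred_char s → Spec_most_occurred_char s (most_occurred_char s)

-- ===== LEMMAS AND PROOFS =====

-- proof-side recursive argmax (head wins ties), matching bestOf's comparison shape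
def maxR (l : List Char) (key : Char → Int) : Option Char :=
  match l with
  | [] => none
  | x :: t =>
    match maxR t key with
    | none => some x
    | some r => if key x < key r then some r else some x

theorem maxR_mem {l : List Char} {key : Char → Int} {m : Char} (h : maxR l key = some m) : m ∈ l := by
  induction l generalizing m with
  | nil => simp [maxR] at h
  | cons a b ih =>
    simp only [maxR] at h
    cases hb : maxR b key with
    | none => rw [hb] at h; simp at h; simp [h]
    | some q =>
      rw [hb] at h
      by_cases hlt : key a < key q
      · simp [hlt] at h; subst h; exact List.mem_cons_of_mem a (ih hb)
      · simp [hlt] at h; simp [h]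

theorem maxR_congr (l : List Char) (k1 k2 : Char → Int) (h : ∀ x ∈ l, k1 x = k2 x) :
    maxR l k1 = maxR l k2 := by
  induction l with
  | nil => rfl
  | cons x t ih =>
    have ht := ih (fun y hy => h y (List.mem_cons_of_mem x hy))
    simp only [maxR, ht]
    cases hm : maxR t k2 with
    | none => rfl
    | some r =>
      have hr := h r (List.mem_cons_of_mem x (maxR_mem hm))
      simp [h x List.mem_cons_self, hr]

theorem max?_acc (key : Char → Int) (l : List Char) :
    ∀ m : Char,
      PySem.List.max? (m :: l) key
      = match maxR l key with
        | none => some m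
        | some r => if key m < key r then some r else some m := by
  induction l with
  | nil => intro m; rfl
  | cons x t ih =>
    intro m
    have hstep : PySem.List.max? (m :: x :: t) key
        = PySem.List.max? ((if key m < key x then x else m) :: t) key := by
      by_cases h : key m < key x <;> simp [PySem.List.max?, List.foldl, h]
    rw [hstep, ih]
    simp only [maxR]
    cases ht : maxR t key with
    | none => by_cases h1 : key m < key x <;> simp [h1]
    | some r =>
      by_cases h1 : key m < key x <;> by_cases h2 : key x < key r <;>
        simp only [h1, h2, if_true, if_false] <;> split_ifs <;>
        first | rfl | omega

theorem max?_eq_maxR (l : List Char) (key : Char → Int) :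
    PySem.List.max? l key = maxR l key := by
  cases l with
  | nil => rfl
  | cons x t =>
    rw [max?_acc]
    rfl

-- A's loop builds exactly Counter(filter-out-spaces)
theorem freq_eq_counter (l : List Char) :
    l.foldl (fun d char => if char ≠ ' ' then d.insert char (d.getD char 0 + 1) else d)
        (PySem.Dict.empty : PySem.Dict Char Int)
      = PySem.Dict.counter (l.filter (fun c => c ≠ ' ')) := by
  rw [← PySem.Dict.foldl_insert_getD_add_one_eq_counter, List.foldl_filter]
  congr 1
  funext d c
  by_cases h : c = ' ' <;> simp [h]

theorem len_filter_ne (c : Char) (v : List Char) :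
    ((v.filter (fun x => x ≠ c)).length : Int) + (v.count c : Int) = (v.length : Int) := by
  induction v with
  | nil => simp
  | cons x t ih =>
    by_cases h : x = c
    · subst h
      rw [List.filter_cons_of_neg (by simp), List.count_cons_self, List.length_cons]
      push_cast
      omega
    · rw [List.filter_cons_of_pos (by simp [h]), List.count_cons_of_ne h,
        List.length_cons, List.length_cons]
      push_cast
      omega

theorem foldl_add_of_mem (v : List Char) (s : PySem.Set Char) (c : Char) (hc : c ∈ s) :
    List.foldl PySem.Set.add s v = List.foldl PySem.Set.add s (v.filter (fun x => x ≠ c)) := by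
  induction v generalizing s with
  | nil => rfl
  | cons x t ih =>
    by_cases h : x = c
    · subst h
      have hadd : PySem.Set.add s x = s := by
        unfold PySem.Set.add PySem.Set.contains
        rw [if_pos (List.contains_iff_mem.mpr hc)]
      rw [List.filter_cons_of_neg (by simp), List.foldl_cons, hadd]
      exact ih s hc
    · rw [List.filter_cons_of_pos (by simp [h]), List.foldl_cons, List.foldl_cons]
      exact ih (PySem.Set.add s x) ((PySem.Set.mem_add s x c).mpr (Or.inl hc))

theorem foldl_add_cons_acc (a : Char) (w : List Char) (hw : ∀ x ∈ w, x ≠ a) :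
    ∀ s : PySem.Set Char,
      List.foldl PySem.Set.add (a :: s) w = a :: List.foldl PySem.Set.add s w := by
  induction w with
  | nil => intro s; rfl
  | cons x t ih =>
    intro s
    have hxa : x ≠ a := hw x List.mem_cons_self
    have hstep : PySem.Set.add (a :: s) x = a :: PySem.Set.add s x := by
      unfold PySem.Set.add PySem.Set.contains
      rw [List.contains_cons]
      have hba : (x == a) = false := by simp [hxa]
      rw [hba]
      simp only [Bool.false_or]
      split <;> rfl
    simp only [List.foldl_cons, hstep]
    exact ih (fun y hy => hw y (List.mem_cons_of_mem x hy)) (PySem.Set.add s x)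

theorem dedup_cons_filter (c : Char) (v : List Char) :
    PySem.List.dedup (c :: v) = c :: PySem.List.dedup (v.filter (fun x => x ≠ c)) := by
  simp only [PySem.List.dedup, PySem.Set.ofList, List.foldl_cons]
  have h1 : PySem.Set.add PySem.Set.empty c = [c] := rfl
  rw [h1, foldl_add_of_mem v [c] c (by simp)]
  exact foldl_add_cons_acc c (v.filter (fun x => x ≠ c))
    (by intro x hx; simp at hx; exact hx.2) []

theorem mem_dedup_filter {x c : Char} {v : List Char}
    (hx : x ∈ PySem.List.dedup (v.filter (fun y => y ≠ c))) : x ∈ v ∧ x ≠ c := by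
  rw [PySem.List.dedup_eq_ofList, PySem.Set.mem_ofList, List.mem_filter] at hx
  exact ⟨hx.1, by simpa using hx.2⟩

-- bestOf computes the first-wins argmax (by count) over the distinct characters
theorem bestOf_eq (u : List Char) :
    bestOf u =
      match maxR (PySem.List.dedup u) (fun x => (u.count x : Int)) with
      | none => (none, 0)
      | some m => (some m, (u.count m : Int)) := by
  have H : ∀ n : Nat, ∀ u : List Char, u.length ≤ n →
      bestOf u =
        match maxR (PySem.List.dedup u) (fun x => (u.count x : Int)) with
        | none => (none, 0)
        | some m => (some m, (u.count m : Int)) := by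
    intro n
    induction n with
    | zero =>
      intro u hu
      have : u = [] := List.length_eq_zero_iff.mp (Nat.le_zero.mp hu)
      subst this
      simp [bestOf, maxR, PySem.List.dedup, PySem.Set.ofList]
    | succ n ih =>
      intro u hu
      cases u with
      | nil => simp [bestOf, maxR, PySem.List.dedup, PySem.Set.ofList]
      | cons c v =>
        have hrest : (c :: v).filter (fun x => x ≠ c) = v.filter (fun x => x ≠ c) := by
          rw [List.filter_cons_of_neg (by simp)]
        have hlen : (v.filter (fun x => x ≠ c)).length ≤ n := by
          have := List.length_filter_le (fun x => decide (x ≠ c)) v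
          simp only [List.length_cons] at hu
          omega
        have ihw := ih (v.filter (fun x => x ≠ c)) hlen
        have hcnt : ((c :: v).length : Int) - ((v.filter (fun x => x ≠ c)).length : Int)
            = ((c :: v).count c : Int) := by
          have := len_filter_ne c v
          rw [List.length_cons, List.count_cons_self]
          push_cast
          push_cast at this
          omega
        have hkeys : maxR (PySem.List.dedup (v.filter (fun x => x ≠ c)))
              (fun x => ((v.filter (fun y => y ≠ c)).count x : Int))
            = maxR (PySem.List.dedup (v.filter (fun x => x ≠ c)))
              (fun x => ((c :: v).count x : Int)) := by
          apply maxR_congr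
          intro x hx
          obtain ⟨hxv, hxc⟩ := mem_dedup_filter hx
          rw [List.count_filter (by simp [hxc]), List.count_cons_of_ne (Ne.symm hxc)]
        rw [dedup_cons_filter]
        simp only [bestOf]
        simp only [hrest, ihw, hkeys, maxR]
        cases hm : maxR (PySem.List.dedup (v.filter (fun x => x ≠ c)))
            (fun x => ((c :: v).count x : Int)) with
        | none =>
          have hc1 : (1 : Int) ≤ ((c :: v).count c : Int) := by
            have : 1 ≤ (c :: v).count c := List.count_pos_iff.mpr List.mem_cons_self
            exact_mod_cast this
          simp only []
          rw [if_pos (by rw [hcnt]; omega), hcnt]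
        | some r =>
          obtain ⟨hrv, hrc⟩ := mem_dedup_filter (maxR_mem hm)
          have hcr : ((v.filter (fun x => x ≠ c)).count r : Int) = ((c :: v).count r : Int) := by
            rw [List.count_filter (by simp [hrc]), List.count_cons_of_ne (Ne.symm hrc)]
          simp only []
          by_cases hlt : ((c :: v).count c : Int) < ((c :: v).count r : Int)
          · rw [if_neg (by rw [hcnt, hcr]; omega), if_pos hlt, hcr]
          · rw [if_pos (by rw [hcnt, hcr]; omega), if_neg hlt, hcnt]
  exact H u.length u (le_refl _)

-- ===== VERDICT (by name: the statement is the Claim_ definition above) =====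
theorem most_occurred_char_spec : Claim_equal_most_occurred_char := by
  intro s _ _
  unfold Spec_most_occurred_char most_occurred_char most_occurred_char_alt
  by_cases hs : s.toList = []
  · simp [hs]
  · simp only [hs, if_false]
    rw [freq_eq_counter]
    have hkey : (fun k => (PySem.Dict.counter (s.toList.filter (fun c => c ≠ ' '))).getD k 0)
        = (fun k => ((s.toList.filter (fun c => c ≠ ' ')).count k : Int)) := by
      funext k
      rw [PySem.Dict.getD_counter]
    rw [PySem.Dict.keys_counter, hkey, ← PySem.List.dedup_eq_ofList, max?_eq_maxR, bestOf_eq]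
    cases hm : maxR (PySem.List.dedup (s.toList.filter (fun c => c ≠ ' ')))
        (fun k => ((s.toList.filter (fun c => c ≠ ' ')).count k : Int)) with
    | none => rfl
    | some m =>
      simp only [Option.map_some]
      rw [PySem.Dict.getD_counter]
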